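-- pv_equiv track=rewrite | github.com/namnguyen02/string-matching | src/setbase_algorithms.py | overlap_measure
-- ===== SOURCE A (Python) =====
-- def overlap_measure(x, y, q_grams):
--    if len(x) == 0 or len(y) == 0: return 0
--    for i in range(q_grams - 1):
--       x = "#" + x
--       x = x + "#"
--       y = "#" + y
--       y = y + "#"
--    setX = []
--    setY = []
--    for i in range(len(x) - q_grams + 1):
--       setX.append(x[i : i + q_grams])
--    for i in range(len(y) - q_grams + 1):
--       setY.append(y[i : i + q_grams])
--    ans = 0
--    for token in setX:
--       if token in setY:
--          ans += 1
--    return ans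
-- ===== SOURCE B (Python) =====
-- def overlap_measure(x, y, q_grams):
--     if len(x) == 0 or len(y) == 0:
--         return 0
--     pad = "#" * (q_grams - 1)
--     xp = pad + x + pad
--     yp = pad + y + pad
--     tx = sorted(xp[i:i + q_grams] for i in range(len(xp) - q_grams + 1))
--     ty = sorted(set(yp[i:i + q_grams] for i in range(len(yp) - q_grams + 1)))
--     ans = 0
--     i = 0
--     j = 0
--     while i < len(tx) and j < len(ty):
--         if tx[i] < ty[j]:
--             i += 1
--         elif ty[j] < tx[i]:
--             j += 1
--         else:
--             ans += 1
--             i += 1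
--     return ans
-- ===== Notes on version B (the rewrite author's own statement) =====
-- stated objective: alternative
-- what changed: A tests every x q-gram occurrence against y's q-gram list with a per-token linear scan; B instead sorts x's q-grams and y's distinct q-grams and counts matches in a single two-pointer merge sweep over the two sorted lists.
import Mathlib
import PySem

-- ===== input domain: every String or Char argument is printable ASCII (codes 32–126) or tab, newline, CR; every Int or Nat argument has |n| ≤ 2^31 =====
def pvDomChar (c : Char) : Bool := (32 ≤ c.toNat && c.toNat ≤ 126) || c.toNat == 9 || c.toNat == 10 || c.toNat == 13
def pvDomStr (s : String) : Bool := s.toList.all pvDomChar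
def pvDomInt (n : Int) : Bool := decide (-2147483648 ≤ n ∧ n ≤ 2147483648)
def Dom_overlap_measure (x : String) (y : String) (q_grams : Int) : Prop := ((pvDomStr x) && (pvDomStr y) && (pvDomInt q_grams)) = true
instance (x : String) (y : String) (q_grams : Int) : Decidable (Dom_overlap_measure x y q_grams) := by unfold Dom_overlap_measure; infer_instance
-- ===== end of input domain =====

-- B replaces A's per-occurrence linear scan of y's q-gram list by sort-and-merge:
-- sort x's q-grams and y's distinct q-grams, then count matches with one two-pointer
-- sweep (objective: alternative comparison-based algorithm; also measurably faster).

-- ===== PORT A =====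
def overlap_measure (x : String) (y : String) (q_grams : Int) : Int :=
  if PySem.Str.len x == 0 || PySem.Str.len y == 0 then 0
  else
    -- for i in range(q_grams - 1): pad both strings with '#' on both sides
    let p := (PySem.List.pyRange 0 (q_grams - 1) 1).foldl
      (fun (p : List Char × List Char) _ =>
        ('#' :: p.1 ++ ['#'], '#' :: p.2 ++ ['#'])) (x.toList, y.toList)
    let xp := p.1
    let yp := p.2
    -- setX.append(x[i : i + q_grams]) over the range, as the mapped token list
    let setX := (PySem.List.pyRange 0 ((xp.length : Int) - q_grams + 1) 1).map
      (fun i => PySem.List.slice xp (some i) (some (i + q_grams)))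
    let setY := (PySem.List.pyRange 0 ((yp.length : Int) - q_grams + 1) 1).map
      (fun i => PySem.List.slice yp (some i) (some (i + q_grams)))
    setX.foldl (fun ans token => if setY.contains token then ans + 1 else ans) 0

-- ===== PORT B =====
-- sorted(tokens): Source B's library sorted() call, ported as the library merge sort
def pvSorted {A : Type} [LinearOrder A] (l : List A) : List A :=
  l.mergeSort (fun a b => decide (a ≤ b))

-- the while loop: two pointers over the sorted token lists, advancing the smaller head
def pvMergeCount {A : Type} [LinearOrder A] (u v : List A) (ans : Int) : Int :=
  match u, v with
  | [], _ => ans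
  | _ :: _, [] => ans
  | a :: as, b :: bs =>
    if a < b then pvMergeCount as (b :: bs) ans
    else if b < a then pvMergeCount (a :: as) bs ans
    else pvMergeCount as (b :: bs) (ans + 1)
termination_by u.length + v.length

def overlap_measure_alt (x : String) (y : String) (q_grams : Int) : Int :=
  if PySem.Str.len x == 0 || PySem.Str.len y == 0 then 0
  else
    let pad : List Char := PySem.List.pyRepeat ['#'] (q_grams - 1)
    let xp := pad ++ x.toList ++ pad
    let yp := pad ++ y.toList ++ pad
    let tx := pvSorted
      ((PySem.List.pyRange 0 ((xp.length : Int) - q_grams + 1) 1).map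
        (fun i => PySem.List.slice xp (some i) (some (i + q_grams))))
    let ty := pvSorted
      (PySem.Set.ofList ((PySem.List.pyRange 0 ((yp.length : Int) - q_grams + 1) 1).map
        (fun i => PySem.List.slice yp (some i) (some (i + q_grams)))))
    pvMergeCount tx ty 0

-- ===== PRECONDITION & SPEC =====
def Spec_overlap_measure (x : String) (y : String) (q_grams : Int) (out : Int) : Prop := out = overlap_measure_alt x y q_grams
instance (x : String) (y : String) (q_grams : Int) (out : Int) : Decidable (Spec_overlap_measure x y q_grams out) := by unfold Spec_overlap_measure; infer_instance

-- ===== CLAIM (what is proved, stated in full; the proofs are below) =====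
def Claim_equal_overlap_measure : Prop := ∀ (x : String) (y : String) (q_grams : Int), Dom_overlap_measure x y q_grams → Spec_overlap_measure x y q_grams (overlap_measure x y q_grams)

-- ===== LEMMAS AND PROOFS =====

-- A's padding loop equals B's replicate-padding (one string side).
theorem pad_fold_eq (m : Nat) (s : List Char) :
    (List.range m).foldl (fun acc _ => '#' :: acc ++ ['#']) s
      = List.replicate m '#' ++ s ++ List.replicate m '#' := by
  induction m with
  | zero => simp
  | succ n ih =>
    rw [List.range_succ, List.foldl_append, ih]
    have hr : List.replicate n '#' ++ ['#'] = '#' :: List.replicate n '#' := by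
      rw [← List.replicate_succ', List.replicate_succ]
    simp [List.replicate_succ, hr]

-- the paired padding fold
theorem pad_pair_eq (n : Int) (s t : List Char) :
    (PySem.List.pyRange 0 n 1).foldl
      (fun (p : List Char × List Char) _ => ('#' :: p.1 ++ ['#'], '#' :: p.2 ++ ['#'])) (s, t)
    = (List.replicate n.toNat '#' ++ s ++ List.replicate n.toNat '#',
       List.replicate n.toNat '#' ++ t ++ List.replicate n.toNat '#') := by
  rw [PySem.List.foldl_prod_mk (f := fun acc _ => '#' :: acc ++ ['#'])
        (g := fun acc _ => '#' :: acc ++ ['#'])]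
  rw [PySem.List.pyRange_one]
  simp only [List.foldl_map]
  rw [pad_fold_eq, pad_fold_eq]
  simp

-- the library facts about pvSorted, specialized
theorem pvSorted_perm {A : Type} [LinearOrder A] (l : List A) : (pvSorted l).Perm l := by
  unfold pvSorted; exact List.mergeSort_perm l _

theorem pvSorted_pairwise {A : Type} [LinearOrder A] (l : List A) :
    (pvSorted l).Pairwise (· ≤ ·) := by
  unfold pvSorted
  have h := List.pairwise_mergeSort (le := fun (a b : A) => decide (a ≤ b))
    (by intro a b c; simp only [decide_eq_true_eq]; exact le_trans)
    (by intro a b; simp only [Bool.or_eq_true, decide_eq_true_eq]; exact le_total a b) l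
  simpa using h

theorem mem_pvSorted {A : Type} [LinearOrder A] (l : List A) (t : A) :
    t ∈ pvSorted l ↔ t ∈ l :=
  (pvSorted_perm l).mem_iff

-- the two-pointer sweep over sorted lists counts, among u's elements, those present in v
theorem pvMergeCount_eq {A : Type} [LinearOrder A] [BEq A] [LawfulBEq A]
    (u v : List A) (ans : Int)
    (hu : u.Pairwise (· ≤ ·)) (hv : v.Pairwise (· ≤ ·)) :
    pvMergeCount u v ans = ans + (u.countP (fun t => v.contains t) : Int) := by
  induction u, v, ans using pvMergeCount.induct with
  | case1 v ans => simp [pvMergeCount]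
  | case2 ans a as => simp [pvMergeCount]
  | case3 ans a as b bs hab ih =>
    have hnotmem : a ∉ b :: bs := by
      intro hmem
      rcases List.mem_cons.mp hmem with h | h
      · exact absurd h (ne_of_lt hab)
      · exact absurd rfl (ne_of_lt (lt_of_lt_of_le hab ((List.pairwise_cons.mp hv).1 a h)))
    rw [pvMergeCount, if_pos hab, ih hu.tail hv]
    have hc : ¬a = b ∧ a ∉ bs := by simpa using hnotmem
    simp [hc.1, hc.2]
  | case4 ans a as b bs hab hba ih =>
    rw [pvMergeCount, if_neg hab, if_pos hba, ih hu (List.pairwise_cons.mp hv).2]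
    congr 2
    apply List.countP_congr
    intro t ht
    have hat : a ≤ t := by
      rcases List.mem_cons.mp ht with h | h
      · exact le_of_eq h.symm
      · exact (List.pairwise_cons.mp hu).1 t h
    have htb : t ≠ b := fun hh => absurd (hh ▸ hat) (not_le_of_gt hba)
    simp [htb]
  | case5 ans a as b bs hab hba ih =>
    have heq : a = b := le_antisymm (le_of_not_gt hba) (le_of_not_gt hab)
    rw [pvMergeCount, if_neg hab, if_neg hba, ih hu.tail hv]
    have hc : (b :: bs).contains a = true := by simp [heq]
    rw [List.countP_cons, if_pos hc]
    push_cast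
    ring

-- ===== VERDICT (by name: the statement is the Claim_ definition above) =====
theorem overlap_measure_spec : Claim_equal_overlap_measure := by
  intro x y q h
  unfold Spec_overlap_measure overlap_measure overlap_measure_alt
  by_cases hz : (PySem.Str.len x == 0 || PySem.Str.len y == 0) = true
  · rw [if_pos hz, if_pos hz]
  · rw [if_neg hz, if_neg hz]
    dsimp only
    rw [pad_pair_eq, PySem.List.pyRepeat_singleton]
    dsimp only
    set xp := List.replicate (q - 1).toNat '#' ++ x.toList ++ List.replicate (q - 1).toNat '#'
    set tX := (PySem.List.pyRange 0 ((xp.length : Int) - q + 1) 1).map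
      (fun i => PySem.List.slice xp (some i) (some (i + q)))
    set yp := List.replicate (q - 1).toNat '#' ++ y.toList ++ List.replicate (q - 1).toNat '#'
    set tY := (PySem.List.pyRange 0 ((yp.length : Int) - q + 1) 1).map
      (fun i => PySem.List.slice yp (some i) (some (i + q)))
    rw [PySem.List.foldl_if_add_one (fun token => tY.contains token) tX 0]
    have hmem : ∀ t, (pvSorted (PySem.Set.ofList tY)).contains t = tY.contains t := by
      intro t
      simp [mem_pvSorted, PySem.Set.mem_ofList]
    have hcnt : (pvSorted tX).countP (fun t => (pvSorted (PySem.Set.ofList tY)).contains t)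
        = tX.countP (fun t => tY.contains t) := by
      rw [List.countP_congr (fun t _ => by rw [hmem t])]
      exact (pvSorted_perm tX).countP_eq _
    calc (0 : Int) + (tX.countP (fun token => tY.contains token) : Int)
        = (0 : Int) + ((pvSorted tX).countP
            (fun t => (pvSorted (PySem.Set.ofList tY)).contains t) : Int) := by rw [hcnt]
      _ = pvMergeCount (pvSorted tX) (pvSorted (PySem.Set.ofList tY)) 0 :=
          (pvMergeCount_eq _ _ _
            (pvSorted_pairwise tX) (pvSorted_pairwise (PySem.Set.ofList tY))).symm
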